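-- pv_equiv track=rewrite | github.com/BADFATMAX/python | lab2/matrix_mult.py | create_matrices
-- ===== SOURCE A (Python) =====
-- def create_matrices(ln, mat1, mat2):
--     flag = 1
--     for i in ln:
--         if not i:
--             flag = 0
--             continue
--         if not flag:
--             mat2.append(i)
--         else:
--             mat1.append(i)
--
--     return mat1, mat2
-- ===== SOURCE B (Python) =====
-- def create_matrices(ln, mat1, mat2):
--     idx = next((i for i, v in enumerate(ln) if not v), None)
--     if idx is None:
--         mat1.extend(v for v in ln if v)
--     else:
--         mat1.extend(v for v in ln[:idx] if v)
--         mat2.extend(v for v in ln[idx + 1:] if v)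
--     return mat1, mat2
-- ===== Notes on version B (the rewrite author's own statement) =====
-- stated objective: alternative
-- what changed: Replaces the single flag-carrying loop by computing the index of the first falsy element once, then extending mat1 and mat2 from the two filtered slices around it.
import Mathlib
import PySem

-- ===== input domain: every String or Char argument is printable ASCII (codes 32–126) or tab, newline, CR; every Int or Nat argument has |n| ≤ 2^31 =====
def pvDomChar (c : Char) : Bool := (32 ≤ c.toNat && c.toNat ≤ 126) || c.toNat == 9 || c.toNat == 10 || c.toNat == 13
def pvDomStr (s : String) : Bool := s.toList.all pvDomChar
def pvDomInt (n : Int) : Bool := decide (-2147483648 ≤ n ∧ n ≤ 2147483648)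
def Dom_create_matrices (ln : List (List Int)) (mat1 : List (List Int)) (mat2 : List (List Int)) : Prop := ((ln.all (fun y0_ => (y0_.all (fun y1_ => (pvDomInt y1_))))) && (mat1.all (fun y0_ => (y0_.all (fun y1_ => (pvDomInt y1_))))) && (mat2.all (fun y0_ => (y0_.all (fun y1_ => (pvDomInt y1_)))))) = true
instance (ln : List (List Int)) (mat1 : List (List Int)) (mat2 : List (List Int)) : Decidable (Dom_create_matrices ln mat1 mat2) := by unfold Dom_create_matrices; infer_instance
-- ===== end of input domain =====

-- B computes the first-falsy split index once and extends from two filtered slices,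
-- instead of A's flag-carrying loop; equivalence of RETURN VALUES is proved (both Pythons
-- mutate mat1/mat2 in place the same way).


-- ===== PORT A =====
-- Loop over ln with state (flag, mat1, mat2); an empty row is Python-falsy.
def create_matrices (ln : List (List Int)) (mat1 : List (List Int)) (mat2 : List (List Int)) : List (List Int) × List (List Int) :=
  let s := ln.foldl
    (fun (s : Int × List (List Int) × List (List Int)) i =>
      if i = [] then (0, s.2.1, s.2.2)
      else if s.1 = 0 then (s.1, s.2.1, s.2.2 ++ [i])
      else (s.1, s.2.1 ++ [i], s.2.2))
    (1, mat1, mat2)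
  (s.2.1, s.2.2)

-- ===== PORT B =====
-- idx = first index of a falsy element (Python's next over enumerate); then two filtered slices.
def create_matrices_alt (ln : List (List Int)) (mat1 : List (List Int)) (mat2 : List (List Int)) : List (List Int) × List (List Int) :=
  match ln.findIdx? (fun v => v = []) with
  | none => (mat1 ++ ln.filter (fun v => v ≠ []), mat2)
  | some idx => (mat1 ++ (ln.take idx).filter (fun v => v ≠ []),
                 mat2 ++ (ln.drop (idx + 1)).filter (fun v => v ≠ []))

-- ===== PRECONDITION & SPEC =====
def Spec_create_matrices (ln : List (List Int)) (mat1 : List (List Int)) (mat2 : List (List Int)) (out : List (List Int) × List (List Int)) : Prop := out = create_matrices_alt ln mat1 mat2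
instance (ln : List (List Int)) (mat1 : List (List Int)) (mat2 : List (List Int)) (out : List (List Int) × List (List Int)) : Decidable (Spec_create_matrices ln mat1 mat2 out) := by unfold Spec_create_matrices; infer_instance

-- ===== CLAIM (what is proved, stated in full; the proofs are below) =====
def Claim_equal_create_matrices : Prop := ∀ (ln : List (List Int)) (mat1 : List (List Int)) (mat2 : List (List Int)), Dom_create_matrices ln mat1 mat2 → Spec_create_matrices ln mat1 mat2 (create_matrices ln mat1 mat2)

-- ===== LEMMAS AND PROOFS =====

-- Once the flag is 0, every non-empty element goes to mat2.
theorem foldA_flag_zero (ln : List (List Int)) (m1 m2 : List (List Int)) :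
    ln.foldl
      (fun (s : Int × List (List Int) × List (List Int)) i =>
        if i = [] then (0, s.2.1, s.2.2)
        else if s.1 = 0 then (s.1, s.2.1, s.2.2 ++ [i])
        else (s.1, s.2.1 ++ [i], s.2.2))
      (0, m1, m2)
    = (0, m1, m2 ++ ln.filter (fun v => v ≠ [])) := by
  induction ln generalizing m2 with
  | nil => simp
  | cons h t ih =>
    by_cases hh : h = [] <;> simp [hh, List.foldl_cons, ih]

-- With flag 1, the loop matches B's split at the first empty element.
theorem foldA_flag_one (ln : List (List Int)) (m1 m2 : List (List Int)) :
    (let s := ln.foldl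
      (fun (s : Int × List (List Int) × List (List Int)) i =>
        if i = [] then (0, s.2.1, s.2.2)
        else if s.1 = 0 then (s.1, s.2.1, s.2.2 ++ [i])
        else (s.1, s.2.1 ++ [i], s.2.2))
      (1, m1, m2)
     (s.2.1, s.2.2))
    = create_matrices_alt ln m1 m2 := by
  induction ln generalizing m1 with
  | nil => simp [create_matrices_alt]
  | cons h t ih =>
    by_cases hh : h = []
    · subst hh
      simp only [create_matrices_alt, List.findIdx?_cons, decide_true, if_true,
        List.foldl_cons]
      rw [foldA_flag_zero]
      simp
    · have hthis := ih (m1 ++ [h])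
      simp only [create_matrices_alt, List.findIdx?_cons, decide_eq_true_eq] at hthis ⊢
      rw [if_neg hh]
      simp only [List.foldl_cons, if_neg hh, if_neg (by norm_num : (1:Int) ≠ 0)]
      rw [hthis]
      cases hfi : t.findIdx? (fun v => decide (v = [])) with
      | none => simp [hh]
      | some k => simp [hh, List.take_succ_cons, List.drop_succ_cons]

-- ===== VERDICT (by name: the statement is the Claim_ definition above) =====
theorem create_matrices_spec : Claim_equal_create_matrices := by
  intro ln m1 m2 _
  show create_matrices ln m1 m2 = create_matrices_alt ln m1 m2
  simpa [create_matrices] using foldA_flag_one ln m1 m2
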